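-- pv_equiv track=rewrite | github.com/bnam91/goskill_stage | bank_manager/scripts/payment_request.py | find_next_empty_row
-- ===== SOURCE A (Python) =====
-- COL_E = 4   # 항목/제품
--
-- COL_F = 5   # 이름/받는사람
--
-- COL_K = 10  # 금액
--
-- def get_cell(row, col_idx):
--     if len(row) > col_idx:
--         return row[col_idx].strip()
--     return ""
--
-- def find_next_empty_row(rows):
--     HEADER_ROW = 8
--     last_data_row = HEADER_ROW
--     for i, row in enumerate(rows):
--         row_num = i + 1
--         if row_num <= HEADER_ROW:
--             continue
--         if get_cell(row, COL_E) or get_cell(row, COL_F) or get_cell(row, COL_K):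
--             last_data_row = row_num
--     return last_data_row + 1
-- ===== SOURCE B (Python) =====
-- COL_E = 4   # 항목/제품
--
-- COL_F = 5   # 이름/받는사람
--
-- COL_K = 10  # 금액
--
-- def get_cell(row, col_idx):
--     if len(row) > col_idx:
--         return row[col_idx].strip()
--     return ""
--
-- def find_next_empty_row(rows):
--     HEADER_ROW = 8
--     # scan from the end: the first non-empty row found is the last data row
--     for row_num in range(len(rows), HEADER_ROW, -1):
--         row = rows[row_num - 1]
--         if get_cell(row, COL_E) or get_cell(row, COL_F) or get_cell(row, COL_K):
--             return row_num + 1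
--     return HEADER_ROW + 1
-- ===== Notes on version B (the rewrite author's own statement) =====
-- stated objective: alternative
-- what changed: B scans rows backwards from the end and returns on the first non-empty row (early exit), instead of A's forward pass maintaining a running last-data-row accumulator.
import Mathlib
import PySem

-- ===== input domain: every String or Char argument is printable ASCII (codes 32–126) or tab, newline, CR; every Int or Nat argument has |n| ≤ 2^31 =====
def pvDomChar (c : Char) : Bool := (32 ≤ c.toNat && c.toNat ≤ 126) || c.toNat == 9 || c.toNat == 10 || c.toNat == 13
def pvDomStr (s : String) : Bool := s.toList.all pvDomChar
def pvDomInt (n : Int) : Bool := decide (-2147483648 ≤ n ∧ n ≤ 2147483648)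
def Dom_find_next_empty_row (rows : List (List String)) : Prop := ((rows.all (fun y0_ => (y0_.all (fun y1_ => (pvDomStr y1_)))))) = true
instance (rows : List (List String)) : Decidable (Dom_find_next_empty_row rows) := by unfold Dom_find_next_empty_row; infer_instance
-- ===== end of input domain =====

-- B replaces A's forward running-maximum pass by a backward scan with early exit (objective: alternative).
-- ===== PORT A =====
def pvGetCell (row : List String) (colIdx : Nat) : String :=
  if row.length > colIdx then PySem.Str.strip (row.getD colIdx "") else ""
  -- row[col_idx] is guarded by the length test, so Lean's getD is exact here

def pvHasData (row : List String) : Bool :=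
  pvGetCell row 4 != "" || pvGetCell row 5 != "" || pvGetCell row 10 != ""

def pvStepA (acc : Int) (p : Int × List String) : Int :=
  let row_num := p.1 + 1
  if row_num ≤ 8 then acc
  else if pvHasData p.2 then row_num else acc

def find_next_empty_row (rows : List (List String)) : Int :=
  let last_data_row := (PySem.List.enumerate rows).foldl pvStepA (8 : Int)
  last_data_row + 1

-- ===== PORT B =====
def pvScanB (rows : List (List String)) : Nat → Int
  | 0 => 9
  | n + 1 =>
    if n + 1 ≤ 8 then 9
    else if pvHasData (rows.getD n []) then (n : Int) + 2
    else pvScanB rows n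

def find_next_empty_row_alt (rows : List (List String)) : Int :=
  pvScanB rows rows.length

-- ===== PRECONDITION & SPEC =====
def Spec_find_next_empty_row (rows : List (List String)) (out : Int) : Prop := out = find_next_empty_row_alt rows
instance (rows : List (List String)) (out : Int) : Decidable (Spec_find_next_empty_row rows out) := by unfold Spec_find_next_empty_row; infer_instance

-- ===== CLAIM (what is proved, stated in full; the proofs are below) =====
def Claim_equal_find_next_empty_row : Prop := ∀ (rows : List (List String)), Dom_find_next_empty_row rows → Spec_find_next_empty_row rows (find_next_empty_row rows)

-- ===== LEMMAS AND PROOFS =====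

-- a fold over enumerate entries that all have index+1 ≤ 8 keeps the accumulator
theorem pvFoldA_small (l : List (Int × List String)) (acc : Int)
    (h : ∀ p ∈ l, p.1 + 1 ≤ 8) : l.foldl pvStepA acc = acc := by
  induction l generalizing acc with
  | nil => rfl
  | cons p l ih =>
    have hp := h p (List.mem_cons_self ..)
    simp only [List.foldl_cons, pvStepA, if_pos hp]
    exact ih acc (fun q hq => h q (List.mem_cons_of_mem _ hq))

-- pvScanB rows m only reads indices < m, so appending a row does not change it
theorem pvScanB_append (xs : List (List String)) (r : List String) (m : Nat)
    (hm : m ≤ xs.length) : pvScanB (xs ++ [r]) m = pvScanB xs m := by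
  induction m with
  | zero => rfl
  | succ n ih =>
    have hn : n < xs.length := hm
    have hget : (xs ++ [r]).getD n [] = xs.getD n [] := by
      simp [List.getD, List.getElem?_append_left hn]
    simp only [pvScanB, hget, ih (Nat.le_of_lt hn)]

theorem pvMain (rows : List (List String)) :
    (PySem.List.enumerate rows).foldl pvStepA (8 : Int) + 1 = pvScanB rows rows.length := by
  induction rows using List.reverseRecOn with
  | nil => rfl
  | append_singleton xs r ih =>
    rw [PySem.List.enumerate_append, List.foldl_append]
    simp only [PySem.List.enumerate_cons, PySem.List.enumerate_nil, List.foldl_cons, List.foldl_nil,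
      List.length_append, List.length_singleton]
    have hgetlast : (xs ++ [r]).getD xs.length [] = r := by
      simp [List.getD]
    by_cases h8 : (0 : Int) + (xs.length : Int) + 1 ≤ 8
    · -- whole prefix also has small indices: fold stays 8, scan returns 9
      have hsmall : ∀ p ∈ PySem.List.enumerate xs (0 : Int), p.1 + 1 ≤ 8 := by
        intro p hp
        rcases (PySem.List.mem_enumerate_iff _ _ _).1 hp with ⟨k, hk, rfl⟩
        have : (k : Int) < (xs.length : Int) := by exact_mod_cast hk
        omega
      have hfold : (PySem.List.enumerate xs (0 : Int)).foldl pvStepA (8 : Int) = 8 :=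
        pvFoldA_small _ _ hsmall
      have hle : xs.length + 1 ≤ 8 := by omega
      rw [hfold]
      simp only [pvStepA, if_pos h8]
      simp [pvScanB, hle]
    · have hgt : ¬ (xs.length + 1 ≤ 8) := by omega
      simp only [pvStepA, if_neg h8, pvScanB, if_neg hgt, hgetlast]
      by_cases hd : pvHasData r
      · simp only [hd, if_true]
        ring
      · simp only [hd, if_false, Bool.false_eq_true]
        rw [pvScanB_append xs r xs.length (Nat.le_refl _)]
        exact ih

-- ===== VERDICT (by name: the statement is the Claim_ definition above) =====
theorem find_next_empty_row_spec : Claim_equal_find_next_empty_row := by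
  intro rows _
  unfold Spec_find_next_empty_row find_next_empty_row find_next_empty_row_alt
  exact pvMain rows
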